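-- pv_equiv track=rewrite | github.com/mshalimay/distributed-password-cracking | helper_functions.py | divide_search_space
-- ===== SOURCE A (Python) =====
-- def divide_search_space(guesses, num_sets):
--     num_sets = min(num_sets, len(guesses))
--     search_spaces = [[] for _ in range(num_sets)]
--     start=0
--     for search_space in search_spaces:
--         j = 0
--         for i in range(start, len(guesses), num_sets):
--             search_space.append(guesses[i])
--             j+=1
--         start+=1
--     return search_spaces
-- ===== SOURCE B (Python) =====
-- def divide_search_space(guesses, num_sets):
--     num_sets = min(num_sets, len(guesses))
--     if num_sets <= 0:
--         return []
--     search_spaces = [[] for _ in range(num_sets)]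
--     for i, g in enumerate(guesses):
--         search_spaces[i % num_sets].append(g)
--     return search_spaces
-- ===== Notes on version B (the rewrite author's own statement) =====
-- stated objective: alternative
-- what changed: Replaced A's nested loops (one strided inner scan of guesses per bucket) by a single linear pass that appends each element to bucket i % num_sets, with an early return for num_sets <= 0.
import Mathlib
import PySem

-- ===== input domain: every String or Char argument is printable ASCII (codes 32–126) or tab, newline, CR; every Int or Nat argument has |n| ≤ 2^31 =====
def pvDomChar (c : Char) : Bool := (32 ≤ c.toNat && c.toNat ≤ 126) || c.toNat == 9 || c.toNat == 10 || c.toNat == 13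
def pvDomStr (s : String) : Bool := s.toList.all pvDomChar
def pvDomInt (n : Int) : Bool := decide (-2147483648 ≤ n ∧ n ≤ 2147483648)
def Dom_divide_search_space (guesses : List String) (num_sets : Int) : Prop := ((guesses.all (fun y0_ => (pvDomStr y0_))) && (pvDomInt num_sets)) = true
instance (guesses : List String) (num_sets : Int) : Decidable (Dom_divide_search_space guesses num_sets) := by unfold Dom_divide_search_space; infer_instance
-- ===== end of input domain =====

-- B replaces A's per-bucket strided scans by one linear pass sending element i to bucket i % num_sets (alternative decomposition, same cost).

-- ===== PORT A =====
def divide_search_space (guesses : List String) (num_sets : Int) : List (List String) :=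
  -- num_sets = min(num_sets, len(guesses))
  let ns : Int := min num_sets (guesses.length : Int)
  -- search_spaces = [[] for _ in range(num_sets)]
  let search_spaces : List (List String) := (PySem.List.pyRange 0 ns 1).map (fun _ => ([] : List String))
  -- start=0; for search_space in search_spaces: for i in range(start, len(guesses), num_sets): search_space.append(guesses[i]); start += 1
  let res := search_spaces.foldl
    (fun (acc : List (List String) × Int) (space : List String) =>
      let filled := (PySem.List.pyRange acc.2 (guesses.length : Int) ns).foldl
        (fun (s : List String) (i : Int) => s ++ [PySem.List.pyGetD guesses i ""]) space
      (acc.1 ++ [filled], acc.2 + 1))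
    (([] : List (List String)), (0 : Int))
  res.1

-- ===== PORT B =====
def divide_search_space_alt (guesses : List String) (num_sets : Int) : List (List String) :=
  let m : Int := min num_sets (guesses.length : Int)
  if m ≤ 0 then []
  else
    let init : List (List String) := (PySem.List.pyRange 0 m 1).map (fun _ => ([] : List String))
    -- for i, g in enumerate(guesses): search_spaces[i % num_sets].append(g)
    (PySem.List.enumerate guesses).foldl
      (fun (spaces : List (List String)) (p : Int × String) =>
        PySem.List.pySetD spaces (PySem.Int.mod p.1 m)
          (PySem.List.pyGetD spaces (PySem.Int.mod p.1 m) [] ++ [p.2]))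
      init

-- ===== PRECONDITION & SPEC =====
def Spec_divide_search_space (guesses : List String) (num_sets : Int) (out : List (List String)) : Prop := out = divide_search_space_alt guesses num_sets
instance (guesses : List String) (num_sets : Int) (out : List (List String)) : Decidable (Spec_divide_search_space guesses num_sets out) := by unfold Spec_divide_search_space; infer_instance

-- ===== CLAIM (what is proved, stated in full; the proofs are below) =====
def Claim_equal_divide_search_space : Prop := ∀ (guesses : List String) (num_sets : Int), Dom_divide_search_space guesses num_sets → Spec_divide_search_space guesses num_sets (divide_search_space guesses num_sets)

-- ===== LEMMAS AND PROOFS =====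

-- elements of l at positions k (position counter starting at s) with (s+k) % M = r, in order
def pvPick (M r : Nat) : List String → Nat → List String
  | [], _ => []
  | x :: l, s => (if s % M = r then [x] else []) ++ pvPick M r l (s + 1)

theorem pvPick_eq_filter (M r : Nat) : ∀ (l : List String) (s : Nat),
    pvPick M r l s
      = ((List.range l.length).filter (fun k => (s + k) % M = r)).map (fun k => l.getD k "")
  | [], s => by simp [pvPick]
  | x :: l, s => by
    rw [pvPick, pvPick_eq_filter M r l (s + 1)]
    simp only [List.length_cons, List.range_succ_eq_map, List.filter_cons, List.filter_map]
    by_cases h : s % M = r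
    · simp [h, Function.comp_def, Nat.succ_eq_add_one, List.getD]
      apply congrArg
      apply List.filter_congr
      intro k _
      have hk : s + 1 + k = s + (k + 1) := by omega
      rw [hk]
    · simp [h, Function.comp_def, Nat.succ_eq_add_one, List.getD]
      apply congrArg
      apply List.filter_congr
      intro k _
      have hk : s + 1 + k = s + (k + 1) := by omega
      rw [hk]

theorem pv_mod_cast (s : Nat) (m : Int) (h : 0 < m) :
    PySem.Int.mod (s : Int) m = ((s % m.toNat : Nat) : Int) := by
  have h2 : ((s % m.toNat : Nat) : Int) = (s : Int) % m := by
    push_cast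
    rw [Int.toNat_of_nonneg h.le]
  rw [h2, PySem.Int.mod, Int.fmod_eq_emod]
  simp [h.le]

theorem pv_mem_filter_range (m r : Int) (hm : 0 < m) (hr : 0 ≤ r) (hrm : r < m) (n : Nat) (x : Int) :
    x ∈ ((List.range n).filter (fun k : Nat => decide ((k : Int) % m = r))).map (fun k : Nat => (k : Int))
      ↔ r ≤ x ∧ x < (n : Int) ∧ m ∣ x - r := by
  constructor
  · intro hmem
    obtain ⟨k, hk, rfl⟩ := List.mem_map.mp hmem
    obtain ⟨hkr, hkm⟩ := List.mem_filter.mp hk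
    rw [List.mem_range] at hkr
    rw [decide_eq_true_eq] at hkm
    have h2 := Int.emod_nonneg (k : Int) (by omega : m ≠ 0)
    have h3 := Int.emod_lt_of_pos (k : Int) hm
    refine ⟨?_, by exact_mod_cast hkr, ?_⟩
    · -- r = k % m ≤ k
      have h4 := Int.mul_ediv_add_emod (k : Int) m
      have h5 : 0 ≤ (k : Int) / m := Int.ediv_nonneg (Int.natCast_nonneg k) hm.le
      nlinarith
    · apply Int.dvd_of_emod_eq_zero
      rw [Int.sub_emod, hkm, Int.emod_eq_of_lt hr hrm]
      simp
  · rintro ⟨h1, h2, q, hq⟩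
    have hx0 : 0 ≤ x := le_trans hr h1
    refine List.mem_map.mpr ⟨x.toNat, List.mem_filter.mpr ⟨List.mem_range.mpr (by omega), ?_⟩, by omega⟩
    rw [decide_eq_true_eq, Int.toNat_of_nonneg hx0]
    have hx : x = m * q + r := by omega
    rw [hx]
    simp [Int.emod_eq_of_lt hr hrm]

theorem pv_pyRange_filter (m r : Int) (hm : 0 < m) (hr : 0 ≤ r) (hrm : r < m) (n : Nat) :
    PySem.List.pyRange r (n : Int) m
      = ((List.range n).filter (fun k : Nat => decide ((k : Int) % m = r))).map (fun k : Nat => (k : Int)) := by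
  have hpw1 : (PySem.List.pyRange r (n : Int) m).Pairwise (· < ·) := by
    rw [PySem.List.pyRange_of_pos _ _ hm]
    refine List.Pairwise.map _ ?_ List.pairwise_lt_range
    intro a b hab
    have h : m * (a : Int) < m * (b : Int) := by
      apply mul_lt_mul_of_pos_left _ hm
      exact_mod_cast hab
    omega
  have hpw2 : (((List.range n).filter (fun k : Nat => decide ((k : Int) % m = r))).map
      (fun k : Nat => (k : Int))).Pairwise (· < ·) := by
    refine List.Pairwise.map _ ?_ (List.Pairwise.filter _ List.pairwise_lt_range)
    intro a b hab
    exact_mod_cast hab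
  have hnd1 : (PySem.List.pyRange r (n : Int) m).Nodup := hpw1.imp ne_of_lt
  have hnd2 : (((List.range n).filter (fun k : Nat => decide ((k : Int) % m = r))).map
      (fun k : Nat => (k : Int))).Nodup := hpw2.imp ne_of_lt
  have hperm : (PySem.List.pyRange r (n : Int) m).Perm
      (((List.range n).filter (fun k : Nat => decide ((k : Int) % m = r))).map (fun k : Nat => (k : Int))) := by
    rw [List.perm_ext_iff_of_nodup hnd1 hnd2]
    intro x
    rw [pv_mem_filter_range m r hm hr hrm n x, PySem.List.mem_pyRange_iff_of_pos hm]
  exact List.Perm.eq_of_pairwise (fun a b _ _ h1 h2 => absurd h2 (lt_asymm h1)) hpw1 hpw2 hperm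

-- a list equals the range-indexed map of its getD
theorem pv_map_getD_range : ∀ (l : List (List String)),
    (List.range l.length).map (fun r => l.getD r []) = l
  | [] => by simp
  | x :: l => by
    simp only [List.length_cons, List.range_succ_eq_map, List.map_cons, List.map_map]
    rw [show ((fun r => (x :: l).getD r []) ∘ Nat.succ) = (fun r => l.getD r []) from rfl]
    rw [pv_map_getD_range l]
    rfl

-- the A-side fold over the list of (empty) buckets
theorem pv_foldA (g : List String) (m : Int) : ∀ (k : Nat) (acc : List (List String)) (t : Int),
    ((List.replicate k ([] : List String)).foldl
      (fun (acc : List (List String) × Int) (space : List String) =>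
        (acc.1 ++ [(PySem.List.pyRange acc.2 (g.length : Int) m).foldl
            (fun (s : List String) (i : Int) => s ++ [PySem.List.pyGetD g i ""]) space],
         acc.2 + 1))
      (acc, t)).1
    = acc ++ (List.range k).map (fun j : Nat =>
        (PySem.List.pyRange (t + (j : Int)) (g.length : Int) m).map (fun i => PySem.List.pyGetD g i ""))
  | 0, acc, t => by simp
  | k + 1, acc, t => by
    rw [List.replicate_succ, List.foldl_cons]
    rw [pv_foldA g m k _ (t + 1)]
    rw [PySem.List.foldl_append_singleton_eq_map, List.range_succ_eq_map]
    simp only [List.map_cons, List.map_map, Nat.cast_zero, add_zero, List.nil_append,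
      List.append_assoc, List.singleton_append]
    congr 1
    congr 1
    apply List.map_congr_left
    intro j _
    congr 2
    push_cast
    ring

-- the B-side fold over the enumerated guesses
theorem pv_foldB (m : Int) (hm : 0 < m) : ∀ (l : List String) (s : Nat)
    (spaces : List (List String)), spaces.length = m.toNat →
    (PySem.List.enumerate l (s : Int)).foldl
      (fun (spaces : List (List String)) (p : Int × String) =>
        PySem.List.pySetD spaces (PySem.Int.mod p.1 m)
          (PySem.List.pyGetD spaces (PySem.Int.mod p.1 m) [] ++ [p.2]))
      spaces
    = (List.range m.toNat).map (fun r => spaces.getD r [] ++ pvPick m.toNat r l s)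
  | [], s, spaces, hlen => by
    simp only [PySem.List.enumerate_nil, List.foldl_nil, pvPick, List.append_nil, ← hlen]
    exact (pv_map_getD_range spaces).symm
  | x :: l, s, spaces, hlen => by
    rw [PySem.List.enumerate_cons]
    rw [List.foldl_cons]
    have hM : 0 < m.toNat := by omega
    have hj : s % m.toNat < m.toNat := Nat.mod_lt _ hM
    have hcast : (s : Int) + 1 = ((s + 1 : Nat) : Int) := by push_cast; ring
    rw [hcast]
    set j := s % m.toNat with hjdef
    have hmod : PySem.Int.mod (s : Int) m = ((j : Nat) : Int) := pv_mod_cast s m hm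
    have hstep :
        (PySem.List.pySetD spaces (PySem.Int.mod (s, x).1 m)
          (PySem.List.pyGetD spaces (PySem.Int.mod (s, x).1 m) [] ++ [(s, x).2]))
        = spaces.set j (spaces.getD j [] ++ [x]) := by
      simp [hmod, PySem.List.pySetD_natCast, PySem.List.pyGetD_natCast]
    rw [hstep]
    rw [pv_foldB m hm l (s + 1) _ (by simp [hlen])]
    apply List.map_congr_left
    intro r hr
    rw [List.mem_range] at hr
    have hget : (spaces.set j (spaces.getD j [] ++ [x])).getD r []
        = if j = r then spaces.getD j [] ++ [x] else spaces.getD r [] := by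
      simp only [List.getD, List.getElem?_set, hlen]
      split_ifs with h1
      · simp
      · rfl
    rw [hget, pvPick]
    by_cases h : j = r
    · simp [← h, ← hjdef, List.append_assoc]
    · simp [h]
      intro hh
      exact absurd hh h

-- bridge between the Int-mod filter (A side) and the Nat-mod filter (B side)
theorem pv_filter_bridge (m : Int) (hm : 0 < m) (r : Nat) (n : Nat) :
    (List.range n).filter (fun k : Nat => decide ((k : Int) % m = (r : Int)))
      = (List.range n).filter (fun k => decide ((0 + k) % m.toNat = r)) := by
  apply List.filter_congr
  intro k _
  simp only [Nat.zero_add, decide_eq_decide]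
  constructor
  · intro h
    have : ((k % m.toNat : Nat) : Int) = ((r : Nat) : Int) := by
      push_cast
      rw [Int.toNat_of_nonneg hm.le]
      exact h
    exact_mod_cast this
  · intro h
    have : ((k % m.toNat : Nat) : Int) = (k : Int) % m := by
      push_cast
      rw [Int.toNat_of_nonneg hm.le]
    rw [← this, h]

-- ===== VERDICT (by name: the statement is the Claim_ definition above) =====
theorem divide_search_space_spec : Claim_equal_divide_search_space := by
  intro guesses num_sets _hdom
  unfold Spec_divide_search_space divide_search_space divide_search_space_alt
  simp only []
  set m : Int := min num_sets (guesses.length : Int) with hmdef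
  by_cases hm : m ≤ 0
  · -- both sides are []
    rw [if_pos hm]
    rw [PySem.List.pyRange_one_eq_nil (by omega)]
    simp
  · replace hm : 0 < m := by omega
    rw [if_neg (by omega)]
    have hrepl : (PySem.List.pyRange 0 m 1).map (fun _ => ([] : List String))
        = List.replicate m.toNat ([] : List String) := by
      rw [List.map_const', PySem.List.length_pyRange_one]
      norm_num
    rw [hrepl]
    rw [pv_foldA guesses m m.toNat [] 0]
    rw [show (PySem.List.enumerate guesses) = PySem.List.enumerate guesses ((0 : Nat) : Int) from rfl]
    rw [pv_foldB m hm guesses 0 _ (by simp [List.length_replicate])]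
    simp only [List.nil_append]
    apply List.map_congr_left
    intro r hr
    rw [List.mem_range] at hr
    have hr0 : (0 : Int) ≤ (r : Int) := by positivity
    have hrm : (r : Int) < m := by
      have := hr
      omega
    rw [Int.zero_add, pv_pyRange_filter m (r : Int) hm hr0 hrm guesses.length]
    rw [List.map_map]
    have hgetd : (List.replicate m.toNat ([] : List String)).getD r [] = [] := by
      simp [List.getD, hr]
    rw [hgetd, List.nil_append, pvPick_eq_filter]
    rw [pv_filter_bridge m hm r guesses.length]
    apply List.map_congr_left
    intro k hk
    rw [List.mem_filter, List.mem_range] at hk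
    simp [Function.comp_apply, PySem.List.pyGetD_natCast]
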